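-- pv_equiv track=rewrite | github.com/spirosrap/playground | primes/euclidn.py | euclidn
-- ===== SOURCE A (Python) =====
-- from math import ceil,sqrt
--
-- def euclidn(n):
-- 	A = [True]*(n + 1)
-- 	en = []
-- 	for i in range(2,ceil(sqrt(n)+1)):
-- 		if A[i]:
-- 			for j in range(i*i,n+1,i):
-- 				A[j] = False
-- 	e = [i for i in range(len(A)) if A[i]== True][2:]
-- 	j = 1
-- 	for i in e:
-- 		j*=i
-- 		en.append(j+1)
--
--
-- 	return en
-- ===== SOURCE B (Python) =====
-- from math import isqrt
--
--
-- def euclidn(n):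
--     en = []
--     prod = 1
--     for i in range(2, n + 1):
--         if all(i % d for d in range(2, isqrt(i) + 1)):
--             prod *= i
--             en.append(prod + 1)
--     return en
-- ===== Notes on version B (the rewrite author's own statement) =====
-- stated objective: simpler
-- what changed: Replaces the boolean sieve table plus two further passes (filter primes, then cumulative product) by a single fused loop that trial-divides each candidate up to its integer square root and multiplies primes into the running Euclid product as they are found.
import Mathlib
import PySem

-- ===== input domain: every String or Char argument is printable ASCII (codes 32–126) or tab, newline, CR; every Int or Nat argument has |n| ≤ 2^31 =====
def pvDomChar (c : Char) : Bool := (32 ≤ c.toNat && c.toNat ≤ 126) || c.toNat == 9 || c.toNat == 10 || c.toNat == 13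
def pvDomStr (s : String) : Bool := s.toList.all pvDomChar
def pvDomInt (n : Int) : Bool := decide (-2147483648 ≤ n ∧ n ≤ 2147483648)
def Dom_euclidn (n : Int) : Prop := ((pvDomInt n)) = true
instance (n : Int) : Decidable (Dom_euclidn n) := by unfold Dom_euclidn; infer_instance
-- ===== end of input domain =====

-- B replaces A's sieve table + separate filter and product passes by one fused
-- trial-division loop (simpler, not faster); A raises ValueError on n < 0 (excluded by Pre_).

-- ===== PORT A =====
-- Sieve of Eratosthenes, transliterated.  Python's `ceil(sqrt(n)+1)` (double sqrt) is
-- computed exactly here for 0 ≤ n ≤ 2^31: the rounded double sqrt(n) crosses an integer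
-- only at perfect squares, so ceil(sqrt(n)+1) = isqrt(n)+1 if n is a square, else isqrt(n)+2.
def euclidn (n : Int) : List Int :=
  let N := n.toNat
  let k := Nat.sqrt N
  let b := if k * k = N then k + 1 else k + 2   -- = ceil(sqrt(n)+1)
  let A0 : List Bool := List.replicate (N + 1) true
  let Afin := (List.range' 2 (b - 2) 1).foldl (fun (A : List Bool) (i : Nat) =>
      if A[i]! then
        (List.range' (i * i) (if i * i ≤ N then (N - i * i) / i + 1 else 0) i).foldl
          (fun a j => a.set j false) A
      else A) A0
  let e := ((List.range (N + 1)).filter (fun i => Afin[i]!)).drop 2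
  (e.foldl (fun (s : Int × List Int) (i : Nat) =>
      (s.1 * (i : Int), s.2 ++ [s.1 * (i : Int) + 1])) (1, ([] : List Int))).2

-- ===== PORT B =====
-- fused loop: for i in range(2, n+1): if all(i % d for d in range(2, isqrt(i)+1)): prod *= i; en.append(prod+1)
def euclidn_alt (n : Int) : List Int :=
  ((List.range' 2 (n.toNat - 1) 1).foldl (fun (s : List Int × Int) (i : Nat) =>
      if (List.range' 2 (Nat.sqrt i - 1) 1).all (fun d => i % d != 0)
      then (s.1 ++ [s.2 * (i : Int) + 1], s.2 * (i : Int))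
      else s) (([] : List Int), 1)).1

-- ===== PRECONDITION & SPEC =====
-- Python A raises ValueError (math.sqrt of a negative) for n < 0; excluded here.
def Pre_euclidn (n : Int) : Prop := 0 ≤ n
instance (n : Int) : Decidable (Pre_euclidn n) := by unfold Pre_euclidn; infer_instance
def pvWitness_euclidn : Int := 10

def Spec_euclidn (n : Int) (out : List Int) : Prop := out = euclidn_alt n
instance (n : Int) (out : List Int) : Decidable (Spec_euclidn n out) := by unfold Spec_euclidn; infer_instance

-- ===== CLAIM (what is proved, stated in full; the proofs are below) =====
def Claim_equal_euclidn : Prop := ∀ (n : Int), Dom_euclidn n → Pre_euclidn n → Spec_euclidn n (euclidn n)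

-- ===== LEMMAS AND PROOFS =====

-- "j has a proper small factor below m": the predicate the sieve array encodes.
abbrev SF (m j : Nat) : Prop := ∃ p < m, 2 ≤ p ∧ p ∣ j ∧ p * p ≤ j

-- one outer step of A's sieve (proof-side name for A's loop body)
def sieveStep (N : Nat) : List Bool → Nat → List Bool := fun A i =>
  if A[i]! then
    (List.range' (i * i) (if i * i ≤ N then (N - i * i) / i + 1 else 0) i).foldl
      (fun a j => a.set j false) A
  else A

lemma length_foldl_set (l : List Nat) (A : List Bool) :
    (l.foldl (fun a k => a.set k false) A).length = A.length := by
  induction l generalizing A with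
  | nil => rfl
  | cons a l ih => simp [ih, List.length_set]

lemma getElem?_foldl_set (l : List Nat) (A : List Bool) (j : Nat) :
    (l.foldl (fun a k => a.set k false) A)[j]? =
      if j ∈ l ∧ j < A.length then some false else A[j]? := by
  induction l generalizing A with
  | nil => simp
  | cons a l ih =>
      simp only [List.foldl_cons]
      rw [ih, List.length_set]
      by_cases hjl : j < A.length
      · by_cases hjm : j ∈ l
        · simp [hjm, hjl]
        · by_cases haj : a = j
          · subst haj
            simp [hjm, hjl]
          · have haj' : j ≠ a := fun h => haj h.symm
            simp [hjm, hjl, haj, haj']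
      · have hA : A[j]? = none := List.getElem?_eq_none (by omega)
        have hA' : (A.set a false)[j]? = none := by
          apply List.getElem?_eq_none
          rw [List.length_set]; omega
        simp [hjl]

lemma mem_mark_range (N i j : Nat) (hj : j ≤ N) :
    (j ∈ List.range' (i * i) (if i * i ≤ N then (N - i * i) / i + 1 else 0) i) ↔
      (i ∣ j ∧ i * i ≤ j) := by
  by_cases hle : i * i ≤ N
  · simp only [hle, if_true, List.mem_range']
    constructor
    · rintro ⟨t, ht, rfl⟩
      exact ⟨⟨i + t, by ring⟩, Nat.le_add_right _ _⟩
    · rintro ⟨⟨q, rfl⟩, hsq⟩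
      rcases Nat.eq_zero_or_pos i with hi0 | hi0
      · subst hi0; simp
      have hiq : i ≤ q := Nat.le_of_mul_le_mul_left hsq hi0
      refine ⟨q - i, ?_, by rw [Nat.mul_sub]; omega⟩
      have h1 : i * (q - i) ≤ N - i * i := by rw [Nat.mul_sub]; omega
      have h2 : q - i ≤ (N - i * i) / i := by
        refine (Nat.le_div_iff_mul_le hi0).mpr ?_
        calc (q - i) * i = i * (q - i) := Nat.mul_comm _ _
          _ ≤ N - i * i := h1
      omega
  · simp only [hle, if_false, List.range']
    simp only [List.not_mem_nil, false_iff]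
    rintro ⟨_, hsq⟩
    omega

lemma sieve_inv (N : Nat) : ∀ c, c + 1 ≤ N →
    (((List.range' 2 c 1).foldl (sieveStep N) (List.replicate (N + 1) true)).length = N + 1) ∧
    (∀ j, j ≤ N →
      ((List.range' 2 c 1).foldl (sieveStep N) (List.replicate (N + 1) true))[j]? =
        some (!decide (SF (c + 2) j))) := by
  intro c
  induction c with
  | zero =>
      intro _
      refine ⟨by simp, fun j hj => ?_⟩
      have hns : ¬ SF 2 j := by rintro ⟨p, h1, h2, _⟩; omega
      simp [Nat.lt_succ_of_le hj, hns]
  | succ c ih =>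
      intro hc
      obtain ⟨ihl, ihg⟩ := ih (by omega)
      rw [List.range'_concat, List.foldl_append]
      simp only [Nat.one_mul, List.foldl_cons, List.foldl_nil]
      have hAi : ((List.range' 2 c 1).foldl (sieveStep N) (List.replicate (N + 1) true))[2 + c]! =
          !decide (SF (c + 2) (2 + c)) := by
        rw [List.getElem!_eq_getElem?_getD, ihg (2 + c) (by omega)]
        rfl
      simp only [sieveStep]
      rw [hAi]
      by_cases hg : SF (c + 2) (2 + c)
      · -- guard false: 2+c already has a small factor; no marking happens
        simp only [hg, decide_true, Bool.not_true, Bool.false_eq_true, if_false]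
        refine ⟨ihl, fun j hj => ?_⟩
        have hiff : SF (c + 1 + 2) j ↔ SF (c + 2) j := by
          constructor
          · rintro ⟨p, hpb, hp2, hdvd, hsq⟩
            by_cases hp : p < c + 2
            · exact ⟨p, hp, hp2, hdvd, hsq⟩
            · have hpe : p = 2 + c := by omega
              obtain ⟨q, hqb, hq2, hqd, hqs⟩ := hg
              have hqj : q ∣ j := hqd.trans (hpe ▸ hdvd)
              have hpp : p ≤ p * p := Nat.le_mul_of_pos_left p (by omega)
              exact ⟨q, hqb, hq2, hqj, by omega⟩
          · rintro ⟨p, hpb, h⟩; exact ⟨p, by omega, h⟩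
        rw [ihg j hj, decide_eq_decide.mpr hiff]
      · -- guard true: mark all multiples of 2+c from (2+c)² up
        simp only [hg, decide_false, Bool.not_false, if_true]
        refine ⟨by rw [length_foldl_set, ihl], fun j hj => ?_⟩
        rw [getElem?_foldl_set, ihl]
        have hmem := mem_mark_range N (2 + c) j hj
        have hiff : SF (c + 1 + 2) j ↔ (SF (c + 2) j ∨ ((2 + c) ∣ j ∧ (2 + c) * (2 + c) ≤ j)) := by
          constructor
          · rintro ⟨p, hpb, hp2, hdvd, hsq⟩
            by_cases hp : p < c + 2
            · exact Or.inl ⟨p, hp, hp2, hdvd, hsq⟩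
            · have hpe : p = 2 + c := by omega
              exact Or.inr ⟨hpe ▸ hdvd, by rw [← hpe]; exact hsq⟩
          · rintro (⟨p, hpb, h⟩ | ⟨hdvd, hsq⟩)
            · exact ⟨p, by omega, h⟩
            · exact ⟨2 + c, by omega, by omega, hdvd, hsq⟩
        by_cases hm : (2 + c) ∣ j ∧ (2 + c) * (2 + c) ≤ j
        · have hsf : SF (c + 1 + 2) j := hiff.mpr (Or.inr hm)
          rw [if_pos ⟨hmem.mpr hm, by omega⟩]
          simp [hsf]
        · rw [if_neg (fun h => hm (hmem.mp h.1))]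
          have h2' : SF (c + 1 + 2) j ↔ SF (c + 2) j := by
            rw [hiff]; exact or_iff_left hm
          rw [ihg j hj, decide_eq_decide.mpr h2']

-- the sieve bound b-1 fits inside the table when N ≥ 2
lemma bound_le (N : Nat) (h2 : 2 ≤ N) :
    (if Nat.sqrt N * Nat.sqrt N = N then Nat.sqrt N + 1 else Nat.sqrt N + 2) - 1 ≤ N := by
  have h1 := Nat.sqrt_lt_self (show 1 < N by omega)
  split <;> omega

lemma b_ge_three (N : Nat) (h2 : 2 ≤ N) :
    3 ≤ (if Nat.sqrt N * Nat.sqrt N = N then Nat.sqrt N + 1 else Nat.sqrt N + 2) := by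
  have h1 : 1 ≤ Nat.sqrt N := Nat.le_sqrt.mpr (by omega)
  split
  · next h =>
    have : Nat.sqrt N ≠ 1 := by rintro h1'; rw [h1'] at h; omega
    omega
  · omega

lemma SF_b (N j : Nat) (hj : j ≤ N) :
    SF (if Nat.sqrt N * Nat.sqrt N = N then Nat.sqrt N + 1 else Nat.sqrt N + 2) j ↔
      SF (j + 1) j := by
  constructor
  · rintro ⟨p, _, hp2, hdvd, hsq⟩
    have hpp : p ≤ p * p := Nat.le_mul_of_pos_left p (by omega)
    exact ⟨p, by omega, hp2, hdvd, hsq⟩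
  · rintro ⟨p, _, hp2, hdvd, hsq⟩
    have hps : p ≤ Nat.sqrt N := Nat.le_sqrt.mpr (hsq.trans hj)
    refine ⟨p, ?_, hp2, hdvd, hsq⟩
    split <;> omega

-- B's trial-division test computes exactly "no small factor"
lemma trial_eq (i : Nat) (h2 : 2 ≤ i) :
    ((List.range' 2 (Nat.sqrt i - 1) 1).all (fun d => i % d != 0)) = !decide (SF (i + 1) i) := by
  have hs1 : 1 ≤ Nat.sqrt i := Nat.le_sqrt.mpr (by omega)
  by_cases h : SF (i + 1) i
  · obtain ⟨p, _, hp2, hdvd, hsq⟩ := h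
    have hps : p ≤ Nat.sqrt i := Nat.le_sqrt.mpr hsq
    have hmem : p ∈ List.range' 2 (Nat.sqrt i - 1) 1 := by
      rw [List.mem_range']; exact ⟨p - 2, by omega, by omega⟩
    have hfalse : ¬ ((List.range' 2 (Nat.sqrt i - 1) 1).all (fun d => i % d != 0) = true) := by
      simp only [List.all_eq_true, not_forall]
      refine ⟨p, hmem, ?_⟩
      simp [Nat.mod_eq_zero_of_dvd hdvd]
    simp only [Bool.not_eq_true] at hfalse
    rw [hfalse]
    have hsf : SF (i + 1) i := by
      have hpp : p ≤ p * p := Nat.le_mul_of_pos_left p (by omega)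
      exact ⟨p, by omega, hp2, hdvd, hsq⟩
    simp [hsf]
  · have hall : (List.range' 2 (Nat.sqrt i - 1) 1).all (fun d => i % d != 0) = true := by
      rw [List.all_eq_true]
      intro d hd
      rw [List.mem_range'] at hd
      obtain ⟨t, ht, rfl⟩ := hd
      simp only [bne_iff_ne, ne_eq]
      intro hmod
      have hdvd : (2 + 1 * t) ∣ i := Nat.dvd_of_mod_eq_zero hmod
      have hle2 : 2 + 1 * t ≤ Nat.sqrt i := by omega
      have hdd : (2 + 1 * t) * (2 + 1 * t) ≤ i := Nat.le_sqrt.mp hle2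
      have hself : 2 + 1 * t ≤ (2 + 1 * t) * (2 + 1 * t) := Nat.le_mul_of_pos_left _ (by omega)
      exact h ⟨2 + 1 * t, by omega, by omega, hdvd, hdd⟩
    rw [hall]
    simp [h]

lemma range_filter_drop (N : Nat) (h2 : 2 ≤ N) (g : Nat → Bool)
    (h0 : g 0 = true) (h1 : g 1 = true) :
    ((List.range (N + 1)).filter g).drop 2 = (List.range' 2 (N - 1) 1).filter g := by
  obtain ⟨m, rfl⟩ : ∃ m, N = m + 2 := ⟨N - 2, by omega⟩
  rw [List.range_eq_range']
  have hsplit : List.range' 0 (m + 2 + 1) 1 = 0 :: 1 :: List.range' 2 (m + 1) 1 := by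
    rw [List.range'_succ, List.range'_succ]
  rw [hsplit]
  simp [h0, h1]

-- A's filter-then-fold equals B's single fused fold
lemma fused (g : Nat → Bool) (l : List Nat) : ∀ (en : List Int) (j : Int),
    ((l.filter g).foldl (fun (s : Int × List Int) (i : Nat) =>
        (s.1 * (i : Int), s.2 ++ [s.1 * (i : Int) + 1])) (j, en)).2 =
    (l.foldl (fun (s : List Int × Int) (i : Nat) =>
        if g i then (s.1 ++ [s.2 * (i : Int) + 1], s.2 * (i : Int)) else s) (en, j)).1 := by
  induction l with
  | nil => intro en j; rfl
  | cons a l ih =>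
      intro en j
      by_cases h : g a <;> simp [h, ih]

-- ===== VERDICT (by name: the statement is the Claim_ definition above) =====
theorem euclidn_spec : Claim_equal_euclidn := by
  intro n _ _
  show euclidn n = euclidn_alt n
  by_cases h0 : n.toNat = 0
  · simp only [euclidn, euclidn_alt, h0]; decide
  by_cases h1 : n.toNat = 1
  · simp only [euclidn, euclidn_alt, h1]; decide
  have h2 : 2 ≤ n.toNat := by omega
  simp only [euclidn, euclidn_alt]
  have hstep : (fun (A : List Bool) (i : Nat) =>
      if A[i]! then
        (List.range' (i * i) (if i * i ≤ n.toNat then (n.toNat - i * i) / i + 1 else 0) i).foldl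
          (fun a j => a.set j false) A
      else A) = sieveStep n.toNat := rfl
  rw [hstep]
  set N := n.toNat with hN
  set b := if Nat.sqrt N * Nat.sqrt N = N then Nat.sqrt N + 1 else Nat.sqrt N + 2 with hb
  have hb3 : 3 ≤ b := by rw [hb]; exact b_ge_three N h2
  have hbN : b - 1 ≤ N := by rw [hb]; exact bound_le N h2
  obtain ⟨hlen, hget⟩ := sieve_inv N (b - 2) (by omega)
  have hSb : ∀ j, j ≤ N → (SF (b - 2 + 2) j ↔ SF (j + 1) j) := by
    intro j hj
    have hS := SF_b N j hj
    rw [← hb] at hS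
    have hc2 : b - 2 + 2 = b := by omega
    rw [hc2]
    exact hS
  have hfin : ∀ j, j ≤ N →
      ((List.range' 2 (b - 2) 1).foldl (sieveStep N) (List.replicate (N + 1) true))[j]! =
        !decide (SF (j + 1) j) := by
    intro j hj
    rw [List.getElem!_eq_getElem?_getD, hget j hj, decide_eq_decide.mpr (hSb j hj)]
    rfl
  have hfilter : (List.range (N + 1)).filter (fun i =>
      ((List.range' 2 (b - 2) 1).foldl (sieveStep N) (List.replicate (N + 1) true))[i]!) =
      (List.range (N + 1)).filter (fun i => !decide (SF (i + 1) i)) := by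
    refine List.filter_congr ?_
    intro i hi
    rw [List.mem_range] at hi
    exact hfin i (by omega)
  rw [hfilter, range_filter_drop N h2 _ (by decide) (by decide)]
  have hpred : (List.range' 2 (N - 1) 1).filter (fun i => !decide (SF (i + 1) i)) =
      (List.range' 2 (N - 1) 1).filter
        (fun i => (List.range' 2 (Nat.sqrt i - 1) 1).all (fun d => i % d != 0)) := by
    refine List.filter_congr ?_
    intro i hi
    rw [List.mem_range'] at hi
    obtain ⟨t, _, rfl⟩ := hi
    exact (trial_eq (2 + 1 * t) (by omega)).symm
  rw [hpred]
  exact fused _ (List.range' 2 (N - 1) 1) [] 1
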